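-- pv_equiv track=rewrite | github.com/sushantnirantar/25-piece-sliding-puzzle | part1/solver2021.py | row_4_left
-- ===== SOURCE A (Python) =====
-- def list_copy(lst):
--     new_lst=[[0 for i in range(0,len(lst[0]))] for j in range(0,len(lst))]
--     for r in range(0,len(lst)):
--         for c in range(0,len(lst[0])):
--             new_lst[r][c]=lst[r][c]
--     return new_lst
--
-- def row_4_left(lst):
--     new_lst=[]
--     return_lst=list_copy(lst)
--     for i in range(0,len(lst[0])):
--         j=i-1
--         if(j<0):
--             j=4
--         new_lst.insert(j,lst[3][i])
--     return_lst.pop(3)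
--     return_lst.insert(3,new_lst)
--     return return_lst
-- ===== SOURCE B (Python) =====
-- def row_4_left(lst):
--     w = len(lst[0])
--     out = [row[:w] for row in lst]
--     row3 = lst[3][:w]
--     out[3] = row3[1:] + row3[:1]
--     return out
-- ===== Notes on version B (the rewrite author's own statement) =====
-- stated objective: simpler
-- what changed: Replaces the hand-written nested-loop list_copy and the index-juggling insert/pop loop by a slice-based copy comprehension and a closed-form left rotation of row 3 by slicing.
import Mathlib
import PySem

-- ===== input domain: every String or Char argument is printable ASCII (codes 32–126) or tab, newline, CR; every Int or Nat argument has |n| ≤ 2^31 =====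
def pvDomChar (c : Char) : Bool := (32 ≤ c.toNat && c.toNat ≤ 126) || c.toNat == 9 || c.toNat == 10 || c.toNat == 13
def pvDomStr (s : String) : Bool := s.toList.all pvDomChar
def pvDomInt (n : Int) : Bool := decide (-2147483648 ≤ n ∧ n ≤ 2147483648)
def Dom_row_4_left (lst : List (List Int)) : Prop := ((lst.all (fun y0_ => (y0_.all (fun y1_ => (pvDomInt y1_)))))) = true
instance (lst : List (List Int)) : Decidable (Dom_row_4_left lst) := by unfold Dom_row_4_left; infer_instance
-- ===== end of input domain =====

-- B replaces the nested-loop copy helper and the insert/pop juggling by a slice-copy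
-- comprehension plus a closed-form left rotation of row 3 (objective: simpler).


-- ===== PORT A =====
-- list_copy: new_lst = zero matrix of shape len(lst) × len(lst[0]), then nested loops
-- assigning new_lst[r][c] = lst[r][c].  Indices from range(0,n) are nonnegative, so
-- List.range / List.set / getD are exact here (Python raises outside Pre_, where pyGetD/getD defaults are never reached).
def pvListCopy (lst : List (List Int)) : List (List Int) :=
  let w := (PySem.List.pyGetD lst 0 []).length
  let init := (List.range lst.length).map (fun _ => (List.range w).map (fun _ => (0 : Int)))
  (List.range lst.length).foldl (fun acc r =>
    (List.range w).foldl (fun acc2 c =>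
      acc2.set r ((acc2.getD r []).set c ((lst.getD r []).getD c 0))) acc) init

def row_4_left (lst : List (List Int)) : List (List Int) :=
  let returnLst := pvListCopy lst
  let newLst := (List.range (PySem.List.pyGetD lst 0 []).length).foldl (fun nl (i : Nat) =>
      let j : Int := if (i : Int) - 1 < 0 then 4 else (i : Int) - 1
      PySem.List.insert nl j ((lst.getD 3 []).getD i 0)) []
  match PySem.List.pop? returnLst 3 with
  | some (_, rest) => PySem.List.insert rest 3 newLst
  | none => returnLst  -- unreachable inside Pre_ (Python raises IndexError here)

-- ===== PORT B =====
def row_4_left_alt (lst : List (List Int)) : List (List Int) :=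
  let w : Int := ((PySem.List.pyGetD lst 0 []).length : Int)
  let out := lst.map (fun row => PySem.List.slice row none (some w))
  let row3 := PySem.List.slice (PySem.List.pyGetD lst 3 []) none (some w)
  out.set 3 (PySem.List.slice row3 (some 1) none ++ PySem.List.slice row3 none (some 1))

-- ===== PRECONDITION & SPEC =====
-- Exactly the inputs on which the Python A returns: at least 4 rows (lst[3], pop(3)),
-- and every row at least as long as row 0 (otherwise lst[r][c] raises IndexError).
def Pre_row_4_left (lst : List (List Int)) : Prop :=
  4 ≤ lst.length ∧ ∀ row ∈ lst, (lst.headD []).length ≤ row.length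
instance (lst : List (List Int)) : Decidable (Pre_row_4_left lst) := by
  unfold Pre_row_4_left; infer_instance
def pvWitness_row_4_left : List (List Int) :=
  [[1, 2, 3, 4], [5, 6, 7, 8], [9, 10, 11, 12], [13, 14, 15, 16]]
def Spec_row_4_left (lst : List (List Int)) (out : List (List Int)) : Prop := out = row_4_left_alt lst
instance (lst : List (List Int)) (out : List (List Int)) : Decidable (Spec_row_4_left lst out) := by unfold Spec_row_4_left; infer_instance

-- ===== CLAIM (what is proved, stated in full; the proofs are below) =====
def Claim_equal_row_4_left : Prop := ∀ (lst : List (List Int)), Dom_row_4_left lst → Pre_row_4_left lst → Spec_row_4_left lst (row_4_left lst)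

-- ===== LEMMAS AND PROOFS =====

-- a row-update fold over range w: pointwise description
theorem pv_foldl_set_len (f : Nat → Int) :
    ∀ (w : Nat) (row : List Int),
      ((List.range w).foldl (fun a c => a.set c (f c)) row).length = row.length := by
  intro w row
  induction w with
  | zero => simp
  | succ w ih => rw [List.range_succ, List.foldl_append]; simp [ih]

theorem pv_foldl_set_get (f : Nat → Int) :
    ∀ (w : Nat) (row : List Int) (i : Nat),
      ((List.range w).foldl (fun a c => a.set c (f c)) row)[i]?
        = if i < w ∧ i < row.length then some (f i) else row[i]? := by
  intro w row i
  induction w with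
  | zero => simp
  | succ w ih =>
      rw [List.range_succ, List.foldl_append]
      simp only [List.foldl_cons, List.foldl_nil]
      rw [List.getElem?_set, pv_foldl_set_len, ih]
      by_cases hiw : w = i
      · subst hiw
        rw [if_pos rfl]
        by_cases hil : w < row.length
        · rw [if_pos hil, if_pos ⟨by omega, hil⟩]
        · rw [if_neg hil, if_neg (fun hc => hil hc.2), List.getElem?_eq_none (by omega)]
      · rw [if_neg hiw]
        by_cases h1 : i < w ∧ i < row.length
        · rw [if_pos h1, if_pos ⟨by omega, h1.2⟩]
        · rw [if_neg h1]
          by_cases h2 : i < w + 1 ∧ i < row.length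
          · exact absurd ⟨by omega, h2.2⟩ h1
          · rw [if_neg h2]

-- updating only row r inside a matrix fold equals setting row r to the row fold
theorem pv_foldl_matrix (g : Nat → Int) (r : Nat) :
    ∀ (L : List Nat) (acc : List (List Int)), r < acc.length →
      L.foldl (fun a c => a.set r ((a.getD r []).set c (g c))) acc
        = acc.set r (L.foldl (fun row c => row.set c (g c)) (acc.getD r [])) := by
  intro L
  induction L with
  | nil =>
      intro acc hr
      simp only [List.foldl_nil]
      rw [List.getD_eq_getElem acc [] hr, List.set_getElem_self hr]
  | cons c L ih =>
      intro acc hr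
      simp only [List.foldl_cons]
      rw [ih _ (by simpa using hr)]
      have hget : (acc.set r ((acc.getD r []).set c (g c))).getD r []
          = (acc.getD r []).set c (g c) := by
        unfold List.getD
        rw [List.getElem?_set_self (by simpa using hr)]
        rfl
      rw [hget, List.set_set]

theorem pv_copy_fold (lst : List (List Int)) (w : Nat)
    (hrow : ∀ row ∈ lst, w ≤ row.length) :
    ∀ (m : Nat), m ≤ lst.length →
      (List.range m).foldl (fun acc r =>
        (List.range w).foldl (fun acc2 c =>
          acc2.set r ((acc2.getD r []).set c ((lst.getD r []).getD c 0))) acc)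
        (List.replicate lst.length ((List.range w).map (fun _ => (0 : Int))))
      = (lst.take m).map (fun row => row.take w)
        ++ List.replicate (lst.length - m) ((List.range w).map (fun _ => (0 : Int))) := by
  intro m
  induction m with
  | zero => simp
  | succ m ih =>
      intro hm
      rw [List.range_succ, List.foldl_append, ih (by omega)]
      simp only [List.foldl_cons, List.foldl_nil]
      have hmlt : m < lst.length := by omega
      set z : List Int := (List.range w).map (fun _ => (0 : Int)) with hz
      set A : List (List Int) := (lst.take m).map (fun row => row.take w) with hA
      have hAlen : A.length = m := by simp [hA]; omega
      have hlen : (A ++ List.replicate (lst.length - m) z).length = lst.length := by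
        simp [hAlen]; omega
      have hmacc : m < (A ++ List.replicate (lst.length - m) z).length := by
        rw [List.length_append, hAlen, List.length_replicate]; omega
      rw [pv_foldl_matrix _ m _ _ hmacc]
      have hgetz : (A ++ List.replicate (lst.length - m) z).getD m [] = z := by
        unfold List.getD
        rw [List.getElem?_append_right (by rw [hAlen]), hAlen]
        rw [Nat.sub_self, List.getElem?_replicate, if_pos (by omega)]
        rfl
      rw [hgetz]
      have hrowm : w ≤ lst[m].length := hrow _ (List.getElem_mem hmlt)
      have hrowfold : (List.range w).foldl
          (fun row c => row.set c ((lst.getD m []).getD c 0)) z = lst[m].take w := by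
        apply List.ext_getElem?
        intro i
        rw [pv_foldl_set_get]
        have hzlen : z.length = w := by simp [hz]
        by_cases hi : i < w
        · rw [if_pos ⟨hi, by omega⟩, List.getElem?_take_of_lt hi,
              List.getD_eq_getElem lst [] hmlt,
              List.getD_eq_getElem _ 0 (by omega),
              List.getElem?_eq_getElem (by omega)]
        · rw [if_neg (fun hc => hi hc.1), List.getElem?_eq_none (by omega),
              List.getElem?_eq_none (by simp; omega)]
      rw [hrowfold]
      have hsa : (A ++ List.replicate (lst.length - m) z).set m (lst[m].take w)
          = A ++ (List.replicate (lst.length - m) z).set 0 (lst[m].take w) := by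
        rw [List.set_append]
        simp [hAlen]
      rw [hsa]
      have hrep : (List.replicate (lst.length - m) z).set 0 (lst[m].take w)
          = lst[m].take w :: List.replicate (lst.length - (m + 1)) z := by
        have : lst.length - m = (lst.length - (m + 1)) + 1 := by omega
        rw [this, List.replicate_succ]
        rfl
      have htk : lst.take (m + 1) = lst.take m ++ [lst[m]] := by
        rw [List.take_add_one, List.getElem?_eq_getElem hmlt]; rfl
      rw [hrep, htk, List.map_append]
      simp [hA]

theorem pv_listCopy_eq (lst : List (List Int))
    (hrow : ∀ row ∈ lst, (lst.getD 0 []).length ≤ row.length) :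
    pvListCopy lst = lst.map (fun row => row.take (lst.getD 0 []).length) := by
  simp only [pvListCopy]
  rw [PySem.List.pyGetD_zero]
  have hinit : (List.range lst.length).map
      (fun _ => (List.range (lst.getD 0 []).length).map (fun _ => (0 : Int)))
      = List.replicate lst.length
          ((List.range (lst.getD 0 []).length).map (fun _ => (0 : Int))) := by
    simp [List.map_const']
  rw [hinit, pv_copy_fold lst _ hrow lst.length (le_refl _)]
  simp

-- the insert loop builds the left rotation of (range w).map a
theorem pv_insert_loop (a : Nat → Int) :
    ∀ (w : Nat),
      (List.range w).foldl (fun nl (i : Nat) =>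
          let j : Int := if (i : Int) - 1 < 0 then 4 else (i : Int) - 1
          PySem.List.insert nl j (a i)) []
        = ((List.range w).map a).drop 1 ++ ((List.range w).map a).take 1 := by
  intro w
  induction w with
  | zero => rfl
  | succ w ih =>
      rw [List.range_succ, List.foldl_append, ih]
      simp only [List.foldl_cons, List.foldl_nil]
      rcases Nat.eq_zero_or_pos w with hw | hw
      · subst hw; simp [PySem.List.insert]
      · have hm : ((List.range w).map a).length = w := by simp
        have hdl : (((List.range w).map a).drop 1).length = w - 1 := by simp
        have hj : (if (w : Int) - 1 < 0 then (4 : Int) else (w : Int) - 1)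
            = ((w - 1 : Nat) : Int) := by
          rw [if_neg (by omega)]; omega
        rw [hj, PySem.List.insert_natCast _ _ _ (by simp)]
        rw [List.take_append_of_le_length (by omega), List.drop_append_of_le_length (by omega)]
        have ht : (((List.range w).map a).drop 1).take (w - 1) = ((List.range w).map a).drop 1 := by
          rw [List.take_of_length_le (by omega)]
        have hd : (((List.range w).map a).drop 1).drop (w - 1) = [] := by
          rw [List.drop_of_length_le (by omega)]
        rw [ht, hd, List.nil_append, List.map_append]
        rw [List.drop_append_of_le_length (by simp; omega),
            List.take_append_of_le_length (by simp; omega)]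
        simp
theorem pv_map_range_getD (src : List Int) (w : Nat) (h : w ≤ src.length) :
    (List.range w).map (fun i => src.getD i 0) = src.take w := by
  apply List.ext_getElem?
  intro i
  by_cases hi : i < w
  · rw [List.getElem?_map, List.getElem?_range hi, List.getElem?_take_of_lt hi,
        List.getElem?_eq_getElem (by omega)]
    simp only [Option.map_some]
    rw [List.getD_eq_getElem src 0 (by omega)]
  · rw [List.getElem?_map, List.getElem?_eq_none (by simp; omega),
        List.getElem?_eq_none (by simp; omega)]
    rfl

-- ===== VERDICT (by name: the statement is the Claim_ definition above) =====
theorem row_4_left_spec : Claim_equal_row_4_left := by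
  intro lst _ hpre
  obtain ⟨h4, hrow⟩ := hpre
  have hhd : lst.headD [] = lst.getD 0 [] := by
    cases lst with
    | nil => simp at h4
    | cons x xs => rfl
  rw [hhd] at hrow
  have h3lt : 3 < lst.length := by omega
  have hrow3 : (lst.getD 0 []).length ≤ lst[3].length := hrow _ (List.getElem_mem h3lt)
  unfold Spec_row_4_left
  simp only [row_4_left, row_4_left_alt, PySem.List.pyGetD_zero]
  rw [pv_listCopy_eq lst hrow, pv_insert_loop, pv_map_range_getD _ _ (by
    rw [List.getD_eq_getElem lst [] h3lt]; exact hrow3)]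
  -- A side: pop(3) then insert(3, …) on L := lst.map (take w)
  have hL3 : 3 < (lst.map (fun row => row.take (lst.getD 0 []).length)).length := by
    simp; omega
  have hpop : PySem.List.pop? (lst.map (fun row => row.take (lst.getD 0 []).length)) 3
      = some ((lst.map (fun row => row.take (lst.getD 0 []).length))[3],
              (lst.map (fun row => row.take (lst.getD 0 []).length)).eraseIdx 3) := by
    rw [show (3 : Int) = ((3 : Nat) : Int) by norm_num, PySem.List.pop?_natCast _ _ hL3]
  rw [hpop]
  dsimp only
  rw [PySem.List.insert_ofNat _ _ _ (by simp [List.length_eraseIdx, h3lt]; omega)]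
  -- B side: slices
  rw [PySem.List.pyGetD_ofNat']
  have hs1 : ∀ xs : List Int, PySem.List.slice xs none (some 1) = xs.take 1 := fun xs => by
    simpa using PySem.List.slice_to xs (by norm_num)
  simp only [PySem.List.slice_to_natCast, PySem.List.slice_from_one, hs1]
  -- both sides as take/drop around index 3
  rw [List.set_eq_take_append_cons_drop, if_pos hL3, List.eraseIdx_eq_take_drop_succ]
  have htk3 : ((lst.map (fun row => row.take (lst.getD 0 []).length)).take 3).length = 3 := by
    simp; omega
  rw [List.take_append_of_le_length (by omega), List.take_take,
      List.drop_append_of_le_length (by omega),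
      List.drop_of_length_le
        (l := (lst.map (fun row => List.take (lst.getD 0 []).length row)).take 3) (by omega),
      List.nil_append]
  simp [List.drop_one]
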